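-- pv_equiv track=rewrite | github.com/Yngie-C/Is_this_book_in | itbi/instadm.py | dict_users
-- ===== SOURCE A (Python) =====
-- def dict_users(users, keywords):
--     users_keyword = []
--     for i in users:
--         keyword = []
--         for j in keywords:
--             if i == j[0]:
--                 keyword.append(j[1])
--         users_keyword.append([i, keyword])
--     user_dict = {}
--     for i in users_keyword:
--         user_dict.update({i[0]:i[1]})   #유저를 key로, 키워드 리스트를 value로 하는 딕셔너리 만들기
--     return user_dict
-- ===== SOURCE B (Python) =====
-- def dict_users(users, keywords):
--     groups = {}
--     for k, v in keywords:
--         groups.setdefault(k, []).append(v)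
--     return {u: groups.get(u, []) for u in users}
-- ===== Notes on version B (the rewrite author's own statement) =====
-- stated objective: faster
-- what changed: B groups the keyword pairs by user in one dict pass and then looks each user up, instead of A's rescanning all keywords for every user.
import Mathlib
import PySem

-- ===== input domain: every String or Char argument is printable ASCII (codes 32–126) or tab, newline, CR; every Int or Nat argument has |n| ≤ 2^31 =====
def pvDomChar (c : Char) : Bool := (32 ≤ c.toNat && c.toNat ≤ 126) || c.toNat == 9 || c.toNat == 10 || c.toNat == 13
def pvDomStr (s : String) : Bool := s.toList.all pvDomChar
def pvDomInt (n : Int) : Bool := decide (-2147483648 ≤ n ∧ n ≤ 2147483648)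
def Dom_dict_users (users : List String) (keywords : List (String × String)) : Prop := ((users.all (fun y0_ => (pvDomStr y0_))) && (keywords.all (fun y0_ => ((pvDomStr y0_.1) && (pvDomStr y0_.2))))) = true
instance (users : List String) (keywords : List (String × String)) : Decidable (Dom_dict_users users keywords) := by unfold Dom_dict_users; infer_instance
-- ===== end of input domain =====

-- B builds the user→keywords mapping by grouping keywords once in a dict instead of rescanning all keywords per user (asymptotically faster).


-- ===== PORT A =====
def dict_users (users : List String) (keywords : List (String × String)) : List (String × List String) :=
  let users_keyword : List (String × List String) :=
    users.foldl (fun acc i =>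
      let keyword := keywords.foldl (fun kw j => if i == j.1 then kw ++ [j.2] else kw) []
      acc ++ [(i, keyword)]) []
  let user_dict : PySem.Dict String (List String) :=
    users_keyword.foldl (fun d p => d.insert p.1 p.2) PySem.Dict.empty
  user_dict.items

-- ===== PORT B =====
def dict_users_alt (users : List String) (keywords : List (String × String)) : List (String × List String) :=
  let groups : PySem.Dict String (List String) :=
    keywords.foldl (fun d p => d.modify p.1 [] (· ++ [p.2])) PySem.Dict.empty
  (users.foldl (fun d u => d.insert u (groups.getD u [])) PySem.Dict.empty).items

-- ===== PRECONDITION & SPEC =====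
def Spec_dict_users (users : List String) (keywords : List (String × String)) (out : List (String × List String)) : Prop := out = dict_users_alt users keywords
instance (users : List String) (keywords : List (String × String)) (out : List (String × List String)) : Decidable (Spec_dict_users users keywords out) := by unfold Spec_dict_users; infer_instance

-- ===== CLAIM (what is proved, stated in full; the proofs are below) =====
def Claim_equal_dict_users : Prop := ∀ (users : List String) (keywords : List (String × String)), Dom_dict_users users keywords → Spec_dict_users users keywords (dict_users users keywords)

-- ===== LEMMAS AND PROOFS =====

-- The per-user value is the same in both programs: A's inner filtering loop
-- equals B's grouped-dict lookup.
theorem dict_users_value_eq (keywords : List (String × String)) (i : String) :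
    keywords.foldl (fun kw j => if i == j.1 then kw ++ [j.2] else kw) [] =
      (keywords.foldl (fun d p => d.modify p.1 [] (· ++ [p.2]))
        (PySem.Dict.empty : PySem.Dict String (List String))).getD i [] := by
  rw [PySem.Dict.getD_foldl_modify_append, PySem.List.foldl_append_if]
  simp only [PySem.Dict.getD_empty, List.nil_append]
  congr 1
  apply List.filter_congr
  intro p _
  simp [eq_comm]

-- A's intermediate users_keyword list is the map of users to their keyword list.
theorem dict_users_users_keyword_eq (users : List String) (keywords : List (String × String)) :
    users.foldl (fun acc i =>
        acc ++ [(i, keywords.foldl (fun kw j => if i == j.1 then kw ++ [j.2] else kw) [])]) [] =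
      users.map (fun i => (i, keywords.foldl (fun kw j => if i == j.1 then kw ++ [j.2] else kw) [])) := by
  rw [PySem.List.foldl_append_singleton_eq_map]
  simp

-- ===== VERDICT (by name: the statement is the Claim_ definition above) =====
theorem dict_users_spec : Claim_equal_dict_users := by
  intro users keywords _
  unfold Spec_dict_users dict_users dict_users_alt
  rw [dict_users_users_keyword_eq]
  dsimp only
  rw [List.foldl_map]
  congr 2
  funext d u
  rw [dict_users_value_eq]
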